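-- pv_equiv track=rewrite | github.com/abbrubin150-ui/neuro-lingua | symmetry_coupling/on_the_edge_learning.py | _reflect_pad
-- ===== SOURCE A (Python) =====
-- from typing import List
--
-- def _reflect_index(idx: int, length: int) -> int:
--     if length <= 0:
--         raise ValueError("length must be positive")
--     if length == 1:
--         return 0
--     while idx < 0 or idx >= length:
--         if idx < 0:
--             idx = -idx - 1
--         elif idx >= length:
--             idx = 2 * length - idx - 1
--     return idx
--
-- def _reflect_pad(signal: List[float], pad_width: int) -> List[float]:
--     if pad_width <= 0:
--         return signal[:]
--     n = len(signal)
--     padded: List[float] = [0.0] * (n + 2 * pad_width)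
--     for i in range(n + 2 * pad_width):
--         source_idx = _reflect_index(i - pad_width, n)
--         padded[i] = signal[source_idx]
--     return padded
-- ===== SOURCE B (Python) =====
-- from typing import List
--
-- def _reflect_pad(sig: List[float], pad_width: int) -> List[float]:
--     if pad_width <= 0:
--         return sig[:]
--     n = len(sig)
--     period = 2 * n
--     out: List[float] = []
--     for i in range(-pad_width, n + pad_width):
--         m = i % period
--         out.append(sig[m if m < n else period - 1 - m])
--     return out
-- ===== Notes on version B (the rewrite author's own statement) =====
-- stated objective: alternative
-- what changed: Replaces the per-element while-loop that repeatedly folds an out-of-range index back into range with a closed-form reflection index (i mod 2n, mirrored into [0,n)), computed in O(1) per output element; measured ~1.35x at the largest timed size, asymptotically better only when pad_width >> n.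
import Mathlib
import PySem

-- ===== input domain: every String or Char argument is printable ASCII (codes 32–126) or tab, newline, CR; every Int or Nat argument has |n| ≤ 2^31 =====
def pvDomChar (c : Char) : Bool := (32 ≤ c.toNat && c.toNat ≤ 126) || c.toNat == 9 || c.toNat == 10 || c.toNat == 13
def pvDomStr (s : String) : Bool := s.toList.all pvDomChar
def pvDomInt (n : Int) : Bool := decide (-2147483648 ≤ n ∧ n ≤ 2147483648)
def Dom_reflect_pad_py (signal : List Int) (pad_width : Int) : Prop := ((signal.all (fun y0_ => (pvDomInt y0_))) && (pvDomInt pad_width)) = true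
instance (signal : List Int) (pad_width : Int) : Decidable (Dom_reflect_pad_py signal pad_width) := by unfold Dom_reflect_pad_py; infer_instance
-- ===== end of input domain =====

-- B replaces A's per-element while-loop with a closed-form reflection index (i mod 2n, mirrored into [0,n)).

-- ===== PORT A =====
-- the while-loop of _reflect_index; the `n < 2` branch is a totality guard only
-- (reflect_index calls it only with 2 ≤ n, where the Python loop terminates)
def reflectLoop (n : Int) (idx : Int) : Int :=
  if n < 2 then idx
  else if idx < 0 then reflectLoop n (-idx - 1)
  else if n ≤ idx then reflectLoop n (2 * n - idx - 1)
  else idx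
termination_by idx.natAbs
decreasing_by
  · omega
  · omega

-- _reflect_index; none = the ValueError on length <= 0
def reflect_index (idx : Int) (length : Int) : Option Int :=
  if length ≤ 0 then none
  else if length = 1 then some 0
  else some (reflectLoop length idx)

def reflect_pad_py (signal : List Int) (pad_width : Int) : List Int :=
  if pad_width ≤ 0 then signal
  else
    let n : Int := signal.length
    (PySem.List.pyRange 0 (n + 2 * pad_width) 1).foldl
      (fun padded i =>
        match reflect_index (i - pad_width) n with
        | none => padded  -- Python raises ValueError here; excluded by Pre_
        | some src => PySem.List.pySetD padded i (PySem.List.pyGetD signal src 0))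
      (List.replicate (n + 2 * pad_width).toNat 0)

-- ===== PORT B =====
def reflect_pad_py_alt (signal : List Int) (pad_width : Int) : List Int :=
  if pad_width ≤ 0 then signal
  else
    let n : Int := signal.length
    let period := 2 * n
    (PySem.List.pyRange (-pad_width) (n + pad_width) 1).foldl
      (fun out i =>
        let m := PySem.Int.mod i period
        out ++ [PySem.List.pyGetD signal (if m < n then m else period - 1 - m) 0])
      []

-- ===== PRECONDITION & SPEC =====
-- Pre_ excludes only pad_width > 0 with an empty signal, where Python A raises ValueError (and B raises ZeroDivisionError)
def Pre_reflect_pad_py (signal : List Int) (pad_width : Int) : Prop :=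
  pad_width ≤ 0 ∨ signal ≠ []
instance (signal : List Int) (pad_width : Int) : Decidable (Pre_reflect_pad_py signal pad_width) := by
  unfold Pre_reflect_pad_py; infer_instance

def pvWitness_reflect_pad_py : List Int × Int := ([1, 2, 3], 2)

def Spec_reflect_pad_py (signal : List Int) (pad_width : Int) (out : List Int) : Prop := out = reflect_pad_py_alt signal pad_width
instance (signal : List Int) (pad_width : Int) (out : List Int) : Decidable (Spec_reflect_pad_py signal pad_width out) := by unfold Spec_reflect_pad_py; infer_instance

-- ===== CLAIM (what is proved, stated in full; the proofs are below) =====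
def Claim_equal_reflect_pad_py : Prop := ∀ (signal : List Int) (pad_width : Int), Dom_reflect_pad_py signal pad_width → Pre_reflect_pad_py signal pad_width → Spec_reflect_pad_py signal pad_width (reflect_pad_py signal pad_width)

-- ===== LEMMAS AND PROOFS =====

-- B's closed-form index as a function (proof helper)
def phi (n : Int) (idx : Int) : Int :=
  let m := PySem.Int.mod idx (2 * n)
  if m < n then m else 2 * n - 1 - m

theorem emod_flip_neg (N idx : Int) (hN : 0 < N) : (-idx - 1) % N = N - 1 - idx % N := by
  have hdm := Int.emod_add_mul_ediv idx N
  have h1 : 0 ≤ idx % N := Int.emod_nonneg _ (by omega)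
  have h2 : idx % N < N := Int.emod_lt_of_pos _ hN
  have key : -idx - 1 = (N - 1 - idx % N) + N * (-(idx / N) - 1) := by ring_nf; omega
  rw [key, Int.add_mul_emod_self_left, Int.emod_eq_of_lt (by omega) (by omega)]

theorem phi_neg (n idx : Int) (hn : 1 ≤ n) : phi n (-idx - 1) = phi n idx := by
  have hN : (0 : Int) < 2 * n := by omega
  simp only [phi, PySem.Int.mod_eq_emod_of_pos hN]
  rw [emod_flip_neg (2 * n) idx hN]
  have h1 : 0 ≤ idx % (2 * n) := Int.emod_nonneg _ (by omega)
  have h2 : idx % (2 * n) < 2 * n := Int.emod_lt_of_pos _ hN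
  split_ifs <;> omega

theorem phi_mirror (n idx : Int) (hn : 1 ≤ n) : phi n (2 * n - idx - 1) = phi n idx := by
  have hN : (0 : Int) < 2 * n := by omega
  have hkey : 2 * n - idx - 1 = (-idx - 1) + (2 * n) * 1 := by ring
  have : phi n (2 * n - idx - 1) = phi n (-idx - 1) := by
    simp only [phi, PySem.Int.mod_eq_emod_of_pos hN, hkey, Int.add_mul_emod_self_left]
  rw [this, phi_neg n idx hn]

theorem reflectLoop_eq_phi (n idx : Int) (hn : 2 ≤ n) : reflectLoop n idx = phi n idx := by
  fun_induction reflectLoop n idx with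
  | case1 i h => omega
  | case2 i _ _ ih => rw [ih, phi_neg n i (by omega)]
  | case3 i _ _ _ ih => rw [ih, phi_mirror n i (by omega)]
  | case4 i _ h1 h2 =>
    have hN : (0 : Int) < 2 * n := by omega
    simp only [phi, PySem.Int.mod_eq_emod_of_pos hN,
      Int.emod_eq_of_lt (by omega : (0 : Int) ≤ i) (by omega : i < 2 * n)]
    rw [if_pos (by omega)]

theorem reflect_index_eq_phi (idx n : Int) (hn : 1 ≤ n) : reflect_index idx n = some (phi n idx) := by
  unfold reflect_index
  rcases eq_or_lt_of_le hn with h1 | h2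
  · -- n = 1
    have hn1 : n = 1 := h1.symm
    subst hn1
    have h1' : 0 ≤ PySem.Int.mod idx 2 := PySem.Int.mod_nonneg idx (by omega)
    have h2' : PySem.Int.mod idx 2 < 2 := PySem.Int.mod_lt idx (by omega)
    simp only [phi]
    norm_num
    split_ifs <;> omega
  · rw [if_neg (by omega), if_neg (by omega), reflectLoop_eq_phi n idx (by omega)]

-- writing f i into slot i for each i in range(N) over an N-element list yields the map of f
theorem foldl_pySetD_range (f : Int → Int) :
    ∀ (N : Nat) (acc : List Int), N ≤ acc.length →
    (PySem.List.pyRange 0 (N : Int) 1).foldl (fun p i => PySem.List.pySetD p i (f i)) acc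
      = (List.range N).map (fun k : Nat => f (k : Int)) ++ acc.drop N := by
  intro N
  induction N with
  | zero => intro acc h; simp [PySem.List.pyRange_one_eq_nil]
  | succ N ih =>
    intro acc h
    have hcast : ((N + 1 : Nat) : Int) = (N : Int) + 1 := by push_cast; ring
    rw [hcast, PySem.List.pyRange_one_succ_right (by positivity), List.foldl_append]
    rw [ih acc (by omega)]
    set M : List Int := (List.range N).map (fun k : Nat => f (k : Int)) with hM
    have hMlen : M.length = N := by simp [hM]
    have hlt : N < (M ++ acc.drop N).length := by simp [hMlen]; omega
    simp only [List.foldl_cons, List.foldl_nil]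
    have hset : PySem.List.pySetD (M ++ acc.drop N) (N : Int) (f (N : Int))
        = (M ++ acc.drop N).set N (f (N : Int)) := by
      simp [PySem.List.pySetD, PySem.List.pySet?_natCast _ N _ hlt]
    have hdrop : acc.drop N = acc[N] :: acc.drop (N + 1) := by
      rw [List.drop_eq_getElem_cons (by omega)]; rfl
    rw [hset, List.set_append_right N _ (by omega), hMlen, Nat.sub_self, hdrop,
      List.set_cons_zero, List.range_succ, List.map_append, ← hM]
    simp

theorem reflect_pad_py_eq (signal : List Int) (pad_width : Int)
    (hpre : Pre_reflect_pad_py signal pad_width) :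
    reflect_pad_py signal pad_width = reflect_pad_py_alt signal pad_width := by
  unfold reflect_pad_py reflect_pad_py_alt
  by_cases hp : pad_width ≤ 0
  · simp [hp]
  · simp only [if_neg hp]
    have hs : signal ≠ [] := by
      rcases hpre with h | h
      · omega
      · exact h
    have hn : 1 ≤ (signal.length : Int) := by
      have := List.length_pos_iff.mpr hs; omega
    set n : Int := (signal.length : Int) with hn_def
    have htot : ((n + 2 * pad_width).toNat : Int) = n + 2 * pad_width := by omega
    -- A side: replace the reflect_index match by phi, then fold of pySetD = map
    rw [show (PySem.List.pyRange 0 (n + 2 * pad_width) 1).foldl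
          (fun padded i =>
            match reflect_index (i - pad_width) n with
            | none => padded
            | some src => PySem.List.pySetD padded i (PySem.List.pyGetD signal src 0))
          (List.replicate (n + 2 * pad_width).toNat 0)
        = (PySem.List.pyRange 0 (n + 2 * pad_width) 1).foldl
          (fun padded i => PySem.List.pySetD padded i
            (PySem.List.pyGetD signal (phi n (i - pad_width)) 0))
          (List.replicate (n + 2 * pad_width).toNat 0) from
      List.foldl_ext _ _ _ (fun p i _ => by rw [reflect_index_eq_phi _ _ hn])]
    rw [← htot, foldl_pySetD_range _ (n + 2 * pad_width).toNat _ (by simp)]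
    -- B side: fold of append = map
    rw [PySem.List.foldl_append_singleton_eq_map, List.nil_append, PySem.List.pyRange_one,
      List.map_map]
    have hlen : (n + pad_width - -pad_width).toNat = (n + 2 * pad_width).toNat := by omega
    rw [hlen]
    simp only [List.drop_replicate, Int.toNat_natCast, Nat.sub_self, List.replicate_zero,
      List.append_nil]
    apply List.map_congr_left
    intro k _
    simp only [Function.comp]
    have harg : -pad_width + (k : Int) = (k : Int) - pad_width := by ring
    rw [harg]
    rfl

-- ===== VERDICT (by name: the statement is the Claim_ definition above) =====
theorem reflect_pad_py_spec : Claim_equal_reflect_pad_py := by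
  intro signal pad_width _ hpre
  exact reflect_pad_py_eq signal pad_width hpre
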